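-- pv_equiv track=rewrite | github.com/Islon777/Hotels_test | issues.py | repeated_nums
-- ===== SOURCE A (Python) =====
-- def repeated_nums(array1, array2):
--     buf_arr = list()
--     for i in array1:
--         count_i1 = array1.count(i)  # подсчет количества одинаковых элементов в 1 массиве
--         count_i2 = array2.count(i)  # подсчет количества одинаковых элементов во 2 массиве
--         if count_i1 >= 2 and count_i2 >= 2:  # если в обоих массивах одного и того же числа больше 2х, то добавляется в новый массив
--             buf_arr.append(i)
--     buf_set = set(buf_arr)  # Преобразование во множество, чтобы оставить только уникальные элементы
--     buf_arr = sorted(list(buf_set))  # превращение в массив (список Python) и его сортировка (необязательно)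
--     return buf_arr
-- ===== SOURCE B (Python) =====
-- def _dups(arr):
--     # sorted distinct values that appear at least twice: sort, then one
--     # neighbour-comparison pass (equal neighbours = a repeat; skip if just added)
--     s = sorted(arr)
--     out = []
--     for a, b in zip(s, s[1:]):
--         if a == b and (not out or out[-1] != b):
--             out.append(b)
--     return out
--
-- def repeated_nums(array1, array2):
--     d2 = set(_dups(array2))
--     return [x for x in _dups(array1) if x in d2]
-- ===== Notes on version B (the rewrite author's own statement) =====
-- stated objective: faster
-- what changed: Replaces the quadratic loop that calls .count on both arrays for every element (plus a final set dedup and sort) with a sort of each array followed by one linear neighbour-comparison pass that emits each duplicated value once in increasing order; the result is array1's duplicate list filtered by membership in array2's duplicate set, already sorted and deduplicated with no final sort.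
import Mathlib
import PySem

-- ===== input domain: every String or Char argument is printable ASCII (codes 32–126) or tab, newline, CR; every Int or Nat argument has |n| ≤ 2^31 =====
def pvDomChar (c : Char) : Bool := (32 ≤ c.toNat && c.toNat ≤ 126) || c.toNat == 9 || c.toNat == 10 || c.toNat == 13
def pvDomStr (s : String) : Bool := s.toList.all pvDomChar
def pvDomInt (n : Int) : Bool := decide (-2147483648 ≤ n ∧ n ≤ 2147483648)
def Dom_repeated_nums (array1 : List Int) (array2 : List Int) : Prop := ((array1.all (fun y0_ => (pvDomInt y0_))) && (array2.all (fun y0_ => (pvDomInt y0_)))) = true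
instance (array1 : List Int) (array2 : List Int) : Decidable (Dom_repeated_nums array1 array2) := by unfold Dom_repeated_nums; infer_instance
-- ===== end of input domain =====

-- B sorts each array once and collects duplicates by a single neighbour-comparison
-- scan, then filters array1's duplicates by membership in array2's; no per-element
-- .count scans and no final sort (the output is already in order).

-- ===== PORT A =====
def repeated_nums (array1 : List Int) (array2 : List Int) : List Int :=
  let buf_arr : List Int := array1.foldl (fun acc i =>
    if 2 ≤ PySem.List.count array1 i ∧ 2 ≤ PySem.List.count array2 i then acc ++ [i] else acc) []
  let buf_set := PySem.Set.ofList buf_arr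
  PySem.List.sorted buf_set (fun x => x) false

-- ===== PORT B =====
-- _dups: sort, then fold over zip(s, s[1:]) appending b when a == b and out[-1] != b
def pvDupsB (arr : List Int) : List Int :=
  let s := PySem.List.sorted arr (fun x => x) false
  (s.zip (s.drop 1)).foldl (fun out p =>
    if p.1 = p.2 ∧ out.getLast? ≠ some p.2 then out ++ [p.2] else out) []

def repeated_nums_alt (array1 : List Int) (array2 : List Int) : List Int :=
  let d2 := PySem.Set.ofList (pvDupsB array2)
  (pvDupsB array1).filter (fun x => decide (x ∈ d2))

-- ===== PRECONDITION & SPEC =====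
def Spec_repeated_nums (array1 : List Int) (array2 : List Int) (out : List Int) : Prop := out = repeated_nums_alt array1 array2
instance (array1 : List Int) (array2 : List Int) (out : List Int) : Decidable (Spec_repeated_nums array1 array2 out) := by unfold Spec_repeated_nums; infer_instance

-- ===== CLAIM (what is proved, stated in full; the proofs are below) =====
def Claim_equal_repeated_nums : Prop := ∀ (array1 : List Int) (array2 : List Int), Dom_repeated_nums array1 array2 → Spec_repeated_nums array1 array2 (repeated_nums array1 array2)

-- ===== LEMMAS AND PROOFS =====

-- tail of B's fold, parameterised by the last appended element (none at the start)
def pvF (v : Option Int) : List (Int × Int) → List Int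
  | [] => []
  | (a, b) :: ps => if a = b ∧ v ≠ some b then b :: pvF (some b) ps else pvF v ps

theorem foldl_eq_pvF (ps : List (Int × Int)) (acc : List Int) :
    ps.foldl (fun out p =>
      if p.1 = p.2 ∧ out.getLast? ≠ some p.2 then out ++ [p.2] else out) acc
    = acc ++ pvF acc.getLast? ps := by
  induction ps generalizing acc with
  | nil => simp [pvF]
  | cons p ps ih =>
    obtain ⟨a, b⟩ := p
    by_cases h : a = b ∧ acc.getLast? ≠ some b
    · simp only [List.foldl_cons, pvF, if_pos h]
      rw [ih]
      simp
    · simp only [List.foldl_cons, pvF, if_neg h]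
      rw [ih]

theorem pvF_spec (s : List Int) (v : Option Int)
    (hs : s.Pairwise (· ≤ ·)) (hv : ∀ w, v = some w → ∀ z ∈ s, w ≤ z) :
    (pvF v (s.zip (s.drop 1))).Pairwise (· < ·) ∧
    ∀ x : Int, x ∈ pvF v (s.zip (s.drop 1)) ↔ (2 ≤ s.count x ∧ v ≠ some x) := by
  induction s generalizing v with
  | nil => simp [pvF]
  | cons a rest ih =>
    cases rest with
    | nil =>
      simp only [List.drop_succ_cons, List.drop_nil, List.zip_nil_right, pvF]
      refine ⟨List.Pairwise.nil, ?_⟩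
      intro x
      simp only [List.not_mem_nil, false_iff, not_and]
      intro hc
      by_cases hax : a = x <;>
        simp [List.count_nil, hax] at hc
    | cons b t =>
      have ha : ∀ z ∈ b :: t, a ≤ z := (List.pairwise_cons.mp hs).1
      have hrest : (b :: t).Pairwise (· ≤ ·) := (List.pairwise_cons.mp hs).2
      have hbt : ∀ z ∈ t, b ≤ z := (List.pairwise_cons.mp hrest).1
      have hzip : (a :: b :: t).zip ((a :: b :: t).drop 1)
          = (a, b) :: ((b :: t).zip ((b :: t).drop 1)) := by simp
      rw [hzip]
      by_cases hc : a = b ∧ v ≠ some b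
      · obtain ⟨hab, hvb⟩ := hc
        have ih' := ih (some b) hrest (by
          intro w hw z hz
          have hwb : w = b := (Option.some.inj hw).symm
          subst hwb
          rcases List.mem_cons.mp hz with h | h
          · exact le_of_eq h.symm
          · exact hbt z h)
        simp only [pvF, if_pos (⟨hab, hvb⟩ : a = b ∧ v ≠ some b)]
        constructor
        · refine List.pairwise_cons.mpr ⟨?_, ih'.1⟩
          intro x hx
          have hm := (ih'.2 x).mp hx
          have hxmem : x ∈ b :: t := List.count_pos_iff.mp (by omega)
          have hne : b ≠ x := fun h => hm.2 (by rw [h])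
          rcases List.mem_cons.mp hxmem with h | h
          · exact absurd h.symm hne
          · exact lt_of_le_of_ne (hbt x h) hne
        · intro x
          rw [List.mem_cons, ih'.2 x]
          constructor
          · rintro (hxb | ⟨hcnt, hne⟩)
            · subst hxb
              refine ⟨?_, fun h => hvb (by rw [h])⟩
              have hpos : 0 < List.count x (x :: t) := List.count_pos_iff.mpr List.mem_cons_self
              rw [hab, List.count_cons_self]
              omega
            · have hxb : x ≠ b := fun h => hne (by rw [h])
              refine ⟨?_, ?_⟩
              · rw [List.count_cons_of_ne (show a ≠ x from fun h => hxb (h.symm.trans hab))]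
                exact hcnt
              · intro hvx
                have hxmem : x ∈ b :: t := List.count_pos_iff.mp (by omega)
                have h1 : x ≤ b := hv x hvx b (by simp)
                have h2 : b ≤ x := by
                  rcases List.mem_cons.mp hxmem with h | h
                  · exact le_of_eq h.symm
                  · exact hbt x h
                exact hxb (le_antisymm h1 h2)
          · rintro ⟨hcnt, hne⟩
            by_cases hxb : x = b
            · exact Or.inl hxb
            · refine Or.inr ⟨?_, fun h => hxb (Option.some.inj h).symm⟩
              rw [List.count_cons_of_ne (show a ≠ x from fun h => hxb (h.symm.trans hab))] at hcnt
              exact hcnt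
      · -- nothing appended for this pair: same pvF on the tail
        have ih' := ih v hrest (fun w hw z hz => hv w hw z (List.mem_cons_of_mem a hz))
        simp only [pvF, if_neg hc]
        refine ⟨ih'.1, ?_⟩
        intro x
        rw [ih'.2 x]
        by_cases hab : a = b
        · have hvb : v = some b := by
            rcases not_and_or.mp hc with h | h
            · exact absurd hab h
            · exact not_not.mp h
          constructor
          · rintro ⟨hcnt, hne⟩
            have hxb : x ≠ b := fun h => hne (by rw [hvb, h])
            refine ⟨?_, hne⟩
            rw [List.count_cons_of_ne (show a ≠ x from fun h => hxb (h.symm.trans hab))]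
            exact hcnt
          · rintro ⟨hcnt, hne⟩
            have hxb : x ≠ b := fun h => hne (by rw [hvb, h])
            refine ⟨?_, hne⟩
            rw [List.count_cons_of_ne (show a ≠ x from fun h => hxb (h.symm.trans hab))] at hcnt
            exact hcnt
        · -- a < b strictly, so a does not occur again in b :: t
          have hanot : a ∉ b :: t := by
            intro hmem
            have h1 : a ≤ b := ha b (by simp)
            rcases List.mem_cons.mp hmem with h | h
            · exact hab h
            · exact hab (le_antisymm h1 (hbt a h))
          constructor
          · rintro ⟨hcnt, hne⟩
            refine ⟨?_, hne⟩
            rcases eq_or_ne x a with rfl | hxa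
            · rw [List.count_cons_self]
              omega
            · rw [List.count_cons_of_ne (Ne.symm hxa)]
              exact hcnt
          · rintro ⟨hcnt, hne⟩
            refine ⟨?_, hne⟩
            rcases eq_or_ne x a with rfl | hxa
            · rw [List.count_cons_self, List.count_eq_zero.mpr hanot] at hcnt
              omega
            · rw [List.count_cons_of_ne (Ne.symm hxa)] at hcnt
              exact hcnt

theorem pvDupsB_spec (arr : List Int) :
    (pvDupsB arr).Pairwise (· < ·) ∧
    ∀ x : Int, x ∈ pvDupsB arr ↔ 2 ≤ arr.count x := by
  unfold pvDupsB
  rw [foldl_eq_pvF]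
  have hpw : (PySem.List.sorted arr (fun x => x) false).Pairwise (· ≤ ·) :=
    PySem.List.sorted_pairwise arr (fun x => x)
  have h := pvF_spec (PySem.List.sorted arr (fun x => x) false) none hpw
    (by intro w hw; exact absurd hw (by simp))
  simp only [List.nil_append, List.getLast?_nil]
  refine ⟨h.1, ?_⟩
  intro x
  rw [h.2 x]
  rw [(PySem.List.sorted_perm arr (fun x => x) false).count_eq]
  simp

theorem repeated_nums_equal (array1 array2 : List Int) :
    repeated_nums array1 array2 = repeated_nums_alt array1 array2 := by
  obtain ⟨h1p, h1m⟩ := pvDupsB_spec array1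
  obtain ⟨h2p, h2m⟩ := pvDupsB_spec array2
  have hBpw : (repeated_nums_alt array1 array2).Pairwise (· < ·) := by
    unfold repeated_nums_alt
    exact h1p.filter _
  have hBnd : (repeated_nums_alt array1 array2).Nodup :=
    hBpw.imp (fun h => ne_of_lt h)
  unfold repeated_nums
  rw [PySem.List.foldl_append_ite_eq_filter]
  simp only [List.nil_append]
  apply PySem.List.sorted_eq_of_perm_of_pairwise_lt
  · rw [List.perm_ext_iff_of_nodup hBnd (PySem.Set.nodup_ofList _)]
    intro x
    simp only [repeated_nums_alt, List.mem_filter, PySem.Set.mem_ofList,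
      decide_eq_true_eq, h1m, h2m, PySem.List.count_eq]
    constructor
    · rintro ⟨hc1, hc2⟩
      refine ⟨List.count_pos_iff.mp (by omega), ?_, ?_⟩
      · exact_mod_cast hc1
      · exact_mod_cast hc2
    · rintro ⟨hmem, hc1, hc2⟩
      exact ⟨by exact_mod_cast hc1, by exact_mod_cast hc2⟩
  · exact hBpw

-- ===== VERDICT (by name: the statement is the Claim_ definition above) =====
theorem repeated_nums_spec : Claim_equal_repeated_nums := by
  intro array1 array2 _
  exact repeated_nums_equal array1 array2
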